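-- pv_equiv track=rewrite | github.com/AdamRiversCEO/vCISO-RiskRadar | RiskRadar.py | assign_risk_levels
-- ===== SOURCE A (Python) =====
-- from typing import Dict, List, Optional, Tuple
--
-- def assign_risk_levels(vulns: List[str], config: Dict) -> Dict[str, List[str]]:
--     levels = {"critical": [], "high": [], "medium": [], "low": []}
--     for vuln in vulns:
--         assigned = False
--         for level, patterns in config["risk_levels"].items():
--             if any(pattern in vuln for pattern in patterns):
--                 levels[level].append(vuln)
--                 assigned = True
--                 break
--         if not assigned:
--             levels["low"].append(vuln)
--     return levels
-- ===== SOURCE B (Python) =====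
-- def assign_risk_levels(vulns, config):
--     # Level-major sweep: each config level in turn claims the still-unlabelled
--     # vulns it matches; one final pass groups vulns by their label (None -> low).
--     label = [None] * len(vulns)
--     for level, patterns in config["risk_levels"].items():
--         label = [level if l is None and any(p in v for p in patterns) else l
--                  for l, v in zip(label, vulns)]
--     levels = {"critical": [], "high": [], "medium": [], "low": []}
--     for v, l in zip(vulns, label):
--         levels[l if l is not None else "low"].append(v)
--     return levels
-- ===== Notes on version B (the rewrite author's own statement) =====
-- stated objective: alternative
-- what changed: Inverts the loop nesting: instead of A's vuln-major loop with an inner break, B makes one level-major sweep per config level that labels the still-unlabelled vulns it matches, then a single grouping pass builds the four buckets from the labels.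
-- outside the precondition, e.g. on assign_risk_levels([], {}): A returns {'critical': [], 'high': [], 'medium': [], 'low': []}, B raises KeyError
import Mathlib
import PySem

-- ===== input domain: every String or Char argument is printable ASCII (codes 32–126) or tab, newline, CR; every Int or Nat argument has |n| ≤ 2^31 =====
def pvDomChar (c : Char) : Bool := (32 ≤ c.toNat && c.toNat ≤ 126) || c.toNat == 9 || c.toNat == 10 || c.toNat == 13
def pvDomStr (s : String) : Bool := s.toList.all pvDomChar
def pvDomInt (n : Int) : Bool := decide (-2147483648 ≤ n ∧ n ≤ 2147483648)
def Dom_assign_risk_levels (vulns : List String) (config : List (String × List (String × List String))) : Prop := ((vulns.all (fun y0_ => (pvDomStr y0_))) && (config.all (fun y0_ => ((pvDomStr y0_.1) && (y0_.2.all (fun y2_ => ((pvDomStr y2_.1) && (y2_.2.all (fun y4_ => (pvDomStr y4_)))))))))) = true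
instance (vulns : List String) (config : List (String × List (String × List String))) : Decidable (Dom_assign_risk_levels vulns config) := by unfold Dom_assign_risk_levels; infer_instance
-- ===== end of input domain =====

-- B inverts the loop nesting: a level-major sweep labels each vuln with its first matching
-- config level, then one grouping pass builds the four buckets; objective: alternative, not faster.

-- 'any(pattern in vuln for pattern in patterns)' — shared by both ports and Pre_
def pvMatches (v : String) (lp : String × List String) : Bool :=
  lp.2.any (fun p => PySem.Str.isIn p v)

-- ===== PORT A =====
-- inner 'for level, patterns in …: … break' with the 'assigned' flag, as structural recursion:
-- the [] case is the 'if not assigned: levels["low"].append(vuln)' tail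
def pvAssignOne (rl : List (String × List String)) (vuln : String)
    (levels : PySem.Dict String (List String)) : PySem.Dict String (List String) :=
  match rl with
  | [] => levels.modify "low" [] (· ++ [vuln])
  | (level, patterns) :: rest =>
      if pvMatches vuln (level, patterns) then
        levels.modify level [] (· ++ [vuln])
      else pvAssignOne rest vuln levels

def assign_risk_levels (vulns : List String) (config : List (String × List (String × List String))) : List (String × List String) :=
  let levels0 : PySem.Dict String (List String) :=
    PySem.Dict.ofList [("critical", []), ("high", []), ("medium", []), ("low", [])]
  -- config["risk_levels"]: first-match lookup; KeyError (= none) is excluded by Pre_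
  let rl : List (String × List String) := ((PySem.Dict.mk config).get? "risk_levels").getD []
  (vulns.foldl (fun levels vuln => pvAssignOne rl vuln levels) levels0).items

-- ===== PORT B =====
-- Source B's per-level list comprehension over zip(label, vulns)
def pvUpd (level : String) (patterns : List String) (l : Option String) (v : String) : Option String :=
  if l.isNone && pvMatches v (level, patterns) then some level else l

def assign_risk_levels_alt (vulns : List String) (config : List (String × List (String × List String))) : List (String × List String) :=
  let rl : List (String × List String) :=
    ((config.find? (fun p => p.1 == "risk_levels")).map Prod.snd).getD []
  -- 'label = [None]*len(vulns)' then one zip-comprehension per config level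
  let label : List (Option String) :=
    rl.foldl (fun lbls lp => List.zipWith (pvUpd lp.1 lp.2) lbls vulns)
      (vulns.map (fun _ => none))
  let levels0 : PySem.Dict String (List String) :=
    PySem.Dict.ofList [("critical", []), ("high", []), ("medium", []), ("low", [])]
  -- 'for v, l in zip(vulns, label): levels[l if l is not None else "low"].append(v)'
  ((vulns.zip label).foldl
    (fun d vl => d.modify (vl.2.getD "low") [] (· ++ [vl.1])) levels0).items

-- ===== PRECONDITION & SPEC =====
-- Pre_ requires the "risk_levels" key to exist (with empty vulns A returns empty buckets
-- without ever touching config, while B reads the key up front and raises KeyError — that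
-- accidental laziness is excluded), and every vuln's first matching config level must be one
-- of the four preset keys, stated as a first-match-index condition (otherwise both Pythons
-- raise KeyError on levels[level]).
def Pre_assign_risk_levels (vulns : List String) (config : List (String × List (String × List String))) : Prop :=
  (config.find? (fun p => p.1 == "risk_levels")).isSome = true ∧
  ∀ v ∈ vulns,
    ∀ i : Fin (((config.find? (fun p => p.1 == "risk_levels")).map Prod.snd).getD []).length,
      (pvMatches v ((((config.find? (fun p => p.1 == "risk_levels")).map Prod.snd).getD []).get i) = true ∧
       ∀ j, j < i →
         pvMatches v ((((config.find? (fun p => p.1 == "risk_levels")).map Prod.snd).getD []).get j) = false) →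
      ((((config.find? (fun p => p.1 == "risk_levels")).map Prod.snd).getD []).get i).1
        ∈ ["critical", "high", "medium", "low"]
instance (vulns : List String) (config : List (String × List (String × List String))) : Decidable (Pre_assign_risk_levels vulns config) := by unfold Pre_assign_risk_levels; infer_instance

def pvWitness_assign_risk_levels : List String × (List (String × List (String × List String))) :=
  (["sql injection", "weak tls", "open port"],
   [("risk_levels", [("critical", ["sql"]), ("high", ["tls"])])])

def Spec_assign_risk_levels (vulns : List String) (config : List (String × List (String × List String))) (out : List (String × List String)) : Prop := out = assign_risk_levels_alt vulns config
instance (vulns : List String) (config : List (String × List (String × List String))) (out : List (String × List String)) : Decidable (Spec_assign_risk_levels vulns config out) := by unfold Spec_assign_risk_levels; infer_instance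

-- ===== CLAIM (what is proved, stated in full; the proofs are below) =====
def Claim_equal_assign_risk_levels : Prop := ∀ (vulns : List String) (config : List (String × List (String × List String))), Dom_assign_risk_levels vulns config → Pre_assign_risk_levels vulns config → Spec_assign_risk_levels vulns config (assign_risk_levels vulns config)

-- ===== LEMMAS AND PROOFS =====

-- proof helper: the first config level whose patterns match v
def pvFirstLevel (rl : List (String × List String)) (v : String) : Option String :=
  match rl with
  | [] => none
  | (lvl, pats) :: rest =>
      if pvMatches v (lvl, pats) then some lvl else pvFirstLevel rest v

-- A's inner loop assigns v to the key pvFirstLevel rl v (default "low")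
theorem pvAssignOne_eq_modify (rl : List (String × List String)) (v : String)
    (d : PySem.Dict String (List String)) :
    pvAssignOne rl v d = d.modify ((pvFirstLevel rl v).getD "low") [] (· ++ [v]) := by
  induction rl with
  | nil => simp [pvAssignOne, pvFirstLevel]
  | cons hd tl ih =>
      obtain ⟨lvl, pats⟩ := hd
      simp only [pvAssignOne, pvFirstLevel]
      split
      · rfl
      · exact ih

-- the assoc-list first-match lookup A uses equals B's find?
theorem dict_mk_get?_eq_find? (config : List (String × List (String × List String))) :
    (PySem.Dict.mk config).get? "risk_levels"
      = (config.find? (fun p => p.1 == "risk_levels")).map Prod.snd := by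
  induction config with
  | nil => simp [PySem.Dict.get?]
  | cons hd tl ih =>
      obtain ⟨k, val⟩ := hd
      rw [PySem.Dict.get?_mk_cons]
      by_cases h : k = "risk_levels"
      · simp [h]
      · simp [List.find?, show (k == "risk_levels") = false by simp [h], ih]

-- zipWith against the list it was mapped from acts pointwise
theorem zipWith_map_left {α β : Type} (f : β → α → β) (g : α → β) (l : List α) :
    List.zipWith f (l.map g) l = l.map (fun v => f (g v) v) := by
  induction l with
  | nil => rfl
  | cons x xs ih => simp [ih]

-- the level-major sweep computes, per vuln, the element-wise fold over rl
theorem foldl_zipWith_eq_map (rl : List (String × List String)) (vulns : List String)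
    (g : String → Option String) :
    rl.foldl (fun lbls lp => List.zipWith (pvUpd lp.1 lp.2) lbls vulns) (vulns.map g)
      = vulns.map (fun v => rl.foldl (fun l lp => pvUpd lp.1 lp.2 l v) (g v)) := by
  induction rl generalizing g with
  | nil => rfl
  | cons hd tl ih =>
      simp only [List.foldl_cons]
      rw [zipWith_map_left, ih]

-- the element-wise fold keeps an already-found label …
theorem foldl_pvUpd_some (rl : List (String × List String)) (v x : String) :
    rl.foldl (fun l lp => pvUpd lp.1 lp.2 l v) (some x) = some x := by
  induction rl with
  | nil => rfl
  | cons hd tl ih => simpa [pvUpd] using ih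

-- … and from none computes exactly the first matching level
theorem foldl_pvUpd_none (rl : List (String × List String)) (v : String) :
    rl.foldl (fun l lp => pvUpd lp.1 lp.2 l v) none = pvFirstLevel rl v := by
  induction rl with
  | nil => rfl
  | cons hd tl ih =>
      obtain ⟨lvl, pats⟩ := hd
      by_cases h : pvMatches v (lvl, pats) = true
      · rw [List.foldl_cons, show pvUpd lvl pats none v = some lvl by simp [pvUpd, h],
           foldl_pvUpd_some]
        simp [pvFirstLevel, h]
      · simp only [pvUpd, pvFirstLevel, List.foldl_cons]
        rw [if_neg (by simp [h]), if_neg h]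
        exact ih

-- folding over zip with a mapped copy is folding over the list itself
theorem foldl_zip_map {α β γ : Type} (F : γ → α × β → γ) (h : α → β) (l : List α) (d : γ) :
    (l.zip (l.map h)).foldl F d = l.foldl (fun d v => F d (v, h v)) d := by
  induction l generalizing d with
  | nil => rfl
  | cons x xs ih => simp [ih]

-- ===== VERDICT (by name: the statement is the Claim_ definition above) =====
theorem assign_risk_levels_spec : Claim_equal_assign_risk_levels := by
  intro vulns config _ _
  unfold Spec_assign_risk_levels
  simp only [assign_risk_levels, assign_risk_levels_alt]
  rw [dict_mk_get?_eq_find?]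
  set rl := ((config.find? (fun p => p.1 == "risk_levels")).map Prod.snd).getD [] with hrl
  rw [foldl_zipWith_eq_map]
  simp only [foldl_pvUpd_none]
  rw [foldl_zip_map]
  congr 1
  exact List.foldl_ext _ _ _ (fun d v _ => pvAssignOne_eq_modify rl v d)
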